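-- pv_equiv track=rewrite | github.com/pypi-data/pypi-mirror-99 | packages/understory/understory-0.0.2-py3-none-any.whl/understory/mkdn/__init__.py | preprocess_hyphens
-- ===== SOURCE A (Python) =====
-- def preprocess_hyphens(mahna):
--     new_lines = []
--     queue = []
--     for line in mahna.splitlines():
--         if line != "-" and not line.endswith("--") and line.endswith("-"):
--             queue.append(line[:-1])
--             continue
--         queued = ""
--         if len(queue) > 0:
--             queued += queue[0]
--             line = line.lstrip(" >")
--         if len(queue) > 1:
--             queued += "".join(line.strip(" >") for line in queue[1:])
--         new_lines.append(queued + line)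
--         queue = []
--     return "\n".join(new_lines)
-- ===== SOURCE B (Python) =====
-- def preprocess_hyphens(mahna):
--     lines = mahna.splitlines()
--
--     def is_cont(line):
--         return line != "-" and not line.endswith("--") and line.endswith("-")
--
--     out = []
--     i = 0
--     n = len(lines)
--     while i < n:
--         j = i
--         while j < n and is_cont(lines[j]):
--             j += 1
--         if j == n:
--             break  # a trailing run of continuation lines with no terminator is dropped
--         if j == i:
--             out.append(lines[j])
--         else:
--             parts = [l[:-1] for l in lines[i:j]]
--             out.append(parts[0] + "".join(p.strip(" >") for p in parts[1:])
--                        + lines[j].lstrip(" >"))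
--         i = j + 1
--     return "\n".join(out)
-- ===== Notes on version B (the rewrite author's own statement) =====
-- stated objective: alternative
-- what changed: Replaces A's single fold that threads a mutable continuation queue and flushes it on each terminating line with a two-level index scan that partitions the lines into blocks (a run of continuation lines plus its terminator, via an inner takeWhile-style scan) and renders each complete block at once, dropping an unterminated trailing run.
import Mathlib
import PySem

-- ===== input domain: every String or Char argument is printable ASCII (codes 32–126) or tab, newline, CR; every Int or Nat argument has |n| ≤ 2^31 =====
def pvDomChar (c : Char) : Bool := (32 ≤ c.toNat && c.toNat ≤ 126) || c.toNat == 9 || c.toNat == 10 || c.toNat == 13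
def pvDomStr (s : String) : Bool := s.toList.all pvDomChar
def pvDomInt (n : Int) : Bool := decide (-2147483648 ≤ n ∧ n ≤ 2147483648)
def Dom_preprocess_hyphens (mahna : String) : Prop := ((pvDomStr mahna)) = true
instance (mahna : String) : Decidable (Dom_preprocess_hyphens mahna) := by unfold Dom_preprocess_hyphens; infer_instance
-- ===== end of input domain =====

-- B re-decomposes A's queue-carrying fold as a two-level block scan (alternative decomposition; same cost).

-- shared string primitives of both Pythons
-- s.lstrip(" >"): exact hand port — Python str.lstrip(chars) removes leading characters that are in chars
def pvLstripGt (s : String) : String := String.ofList (s.toList.dropWhile (fun c => c == ' ' || c == '>'))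
-- s.strip(" >")
def pvStripGt (s : String) : String := PySem.Str.stripChars s " >"
-- line != "-" and not line.endswith("--") and line.endswith("-")
def pvIsCont (line : String) : Bool :=
  line != "-" && !(PySem.Str.endswith line "--") && PySem.Str.endswith line "-"

-- ===== PORT A =====
-- the body of A's for-loop; state = (new_lines, queue)
def pvAstep (st : List String × List String) (line : String) : List String × List String :=
  if pvIsCont line then
    (st.1, st.2 ++ [PySem.Str.slice line none (some (-1))])
  else
    let queued : String := ""
    let queued := if st.2.length > 0 then queued ++ st.2.headD "" else queued
    let line := if st.2.length > 0 then pvLstripGt line else line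
    let queued := if st.2.length > 1 then
        queued ++ PySem.Str.join "" ((st.2.drop 1).map pvStripGt) else queued
    (st.1 ++ [queued ++ line], [])

def preprocess_hyphens (mahna : String) : String :=
  PySem.Str.join "\n" ((PySem.Str.splitlines mahna).foldl pvAstep ([], [])).1

-- ===== PORT B =====
-- outer while loop of Source B; the inner `while j < n and is_cont(lines[j])` scan is the
-- takeWhile/dropWhile split of the remaining lines, the `break` at j == n is the [] case
def pvAltGo (lines : List String) : List String :=
  match h : lines.dropWhile pvIsCont with
  | [] => []
  | t :: rest =>
    let run := lines.takeWhile pvIsCont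
    (if run.isEmpty then t
     else
       let parts := run.map (fun l => PySem.Str.slice l none (some (-1)))
       parts.headD "" ++ PySem.Str.join "" ((parts.drop 1).map pvStripGt) ++ pvLstripGt t)
    :: pvAltGo rest
termination_by lines.length
decreasing_by
  have := List.length_dropWhile_le pvIsCont lines
  rw [h] at this; simp at this; omega

def preprocess_hyphens_alt (mahna : String) : String :=
  PySem.Str.join "\n" (pvAltGo (PySem.Str.splitlines mahna))

-- ===== PRECONDITION & SPEC =====
def Spec_preprocess_hyphens (mahna : String) (out : String) : Prop := out = preprocess_hyphens_alt mahna
instance (mahna : String) (out : String) : Decidable (Spec_preprocess_hyphens mahna out) := by unfold Spec_preprocess_hyphens; infer_instance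

-- ===== CLAIM (what is proved, stated in full; the proofs are below) =====
def Claim_equal_preprocess_hyphens : Prop := ∀ (mahna : String), Dom_preprocess_hyphens mahna → Spec_preprocess_hyphens mahna (preprocess_hyphens mahna)

-- ===== LEMMAS AND PROOFS =====

-- canonical form of the line A emits when it flushes queue `q` on terminating line `t`
def pvEmit : List String → String → String
  | [], t => t
  | c0 :: cs, t => c0 ++ PySem.Str.join "" (cs.map pvStripGt) ++ pvLstripGt t

-- generalisation of pvAltGo carrying A's pending queue
def pvGoQ (queue : List String) (lines : List String) : List String :=
  match h : lines.dropWhile pvIsCont with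
  | [] => []
  | t :: rest =>
    pvEmit (queue ++ (lines.takeWhile pvIsCont).map
      (fun l => PySem.Str.slice l none (some (-1)))) t :: pvGoQ [] rest
termination_by lines.length
decreasing_by
  have := List.length_dropWhile_le pvIsCont lines
  rw [h] at this; simp at this; omega

theorem pvGoQ_drop_nil (q lines : List String) (h : lines.dropWhile pvIsCont = []) :
    pvGoQ q lines = [] := by
  rw [pvGoQ]; split
  · rfl
  · rename_i t rest h'; rw [h] at h'; cases h'

theorem pvGoQ_drop_cons (q lines : List String) (t : String) (rest : List String)
    (h : lines.dropWhile pvIsCont = t :: rest) :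
    pvGoQ q lines = pvEmit (q ++ (lines.takeWhile pvIsCont).map
      (fun l => PySem.Str.slice l none (some (-1)))) t :: pvGoQ [] rest := by
  rw [pvGoQ]; split
  · rename_i h'; rw [h] at h'; cases h'
  · rename_i t' rest' h'; rw [h] at h'
    obtain ⟨rfl, rfl⟩ : t' = t ∧ rest' = rest := by
      constructor <;> injection h' <;> simp_all
    rfl

theorem pvAltGo_drop_nil (lines : List String) (h : lines.dropWhile pvIsCont = []) :
    pvAltGo lines = [] := by
  rw [pvAltGo]; split
  · rfl
  · rename_i t rest h'; rw [h] at h'; cases h'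

theorem pvAltGo_drop_cons (lines : List String) (t : String) (rest : List String)
    (h : lines.dropWhile pvIsCont = t :: rest) :
    pvAltGo lines =
      (let run := lines.takeWhile pvIsCont
       if run.isEmpty then t
       else
         let parts := run.map (fun l => PySem.Str.slice l none (some (-1)))
         parts.headD "" ++ PySem.Str.join "" ((parts.drop 1).map pvStripGt) ++ pvLstripGt t)
      :: pvAltGo rest := by
  rw [pvAltGo]; split
  · rename_i h'; rw [h] at h'; cases h'
  · rename_i t' rest' h'; rw [h] at h'
    obtain ⟨rfl, rfl⟩ : t' = t ∧ rest' = rest := by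
      constructor <;> injection h' <;> simp_all
    rfl

theorem pvAstep_emit (q : List String) (l : String) (acc : List String)
    (hl : pvIsCont l = false) :
    pvAstep (acc, q) l = (acc ++ [pvEmit q l], []) := by
  cases q with
  | nil => simp [pvAstep, hl, pvEmit]
  | cons c0 cs =>
    cases cs with
    | nil =>
      simp [pvAstep, hl, pvEmit,
        show PySem.Str.join "" ([] : List String) = "" from rfl]
    | cons c1 cs' => simp [pvAstep, hl, pvEmit, String.append_assoc]

theorem pvFold_goQ (lines : List String) : ∀ (acc queue : List String),
    (lines.foldl pvAstep (acc, queue)).1 = acc ++ pvGoQ queue lines := by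
  induction lines with
  | nil => intro acc queue; simp [pvGoQ_drop_nil]
  | cons l ls ih =>
    intro acc queue
    by_cases hl : pvIsCont l = true
    · have hstep : pvAstep (acc, queue) l
          = (acc, queue ++ [PySem.Str.slice l none (some (-1))]) := by
        simp [pvAstep, hl]
      rw [List.foldl_cons, hstep, ih]
      congr 1
      have hd : (l :: ls).dropWhile pvIsCont = ls.dropWhile pvIsCont :=
        List.dropWhile_cons_of_pos hl
      cases hdrop : ls.dropWhile pvIsCont with
      | nil => rw [pvGoQ_drop_nil _ _ (hd.trans hdrop), pvGoQ_drop_nil _ _ hdrop]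
      | cons t rest =>
        rw [pvGoQ_drop_cons _ _ _ _ (hd.trans hdrop), pvGoQ_drop_cons _ _ _ _ hdrop]
        rw [List.takeWhile_cons_of_pos hl]
        simp
    · rw [Bool.not_eq_true] at hl
      rw [List.foldl_cons, pvAstep_emit queue l acc hl, ih]
      have hd : (l :: ls).dropWhile pvIsCont = l :: ls :=
        List.dropWhile_cons_of_neg (by simp [hl])
      rw [pvGoQ_drop_cons _ _ _ _ hd, List.takeWhile_cons_of_neg (by simp [hl])]
      simp

theorem pvAltGo_eq_goQ (lines : List String) : pvAltGo lines = pvGoQ [] lines := by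
  induction lines using pvAltGo.induct with
  | case1 lines h => rw [pvAltGo_drop_nil _ h, pvGoQ_drop_nil _ _ h]
  | case2 lines t rest h ih =>
    rw [pvAltGo_drop_cons _ _ _ h, pvGoQ_drop_cons _ _ _ _ h, ih]
    congr 1
    cases hr : lines.takeWhile pvIsCont with
    | nil => simp [pvEmit]
    | cons c0 cs => simp [pvEmit, String.append_assoc]

-- ===== VERDICT (by name: the statement is the Claim_ definition above) =====
theorem preprocess_hyphens_spec : Claim_equal_preprocess_hyphens := by
  intro mahna _
  unfold Spec_preprocess_hyphens preprocess_hyphens preprocess_hyphens_alt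
  rw [pvAltGo_eq_goQ, pvFold_goQ]
  simp
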